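-- pv_equiv track=rewrite | github.com/YZY-stack/multi-spec-elucidation | spectromol/analysis/inference_robustness.py | update_ring_status_for_beam
-- ===== SOURCE A (Python) =====
-- def update_ring_status_for_beam(seq_chars, open_rings):
--     digits = ['1','2','3','4','5']
--     count_digits = {d:0 for d in digits}
--     for tok in seq_chars:
--         if tok in digits:
--             count_digits[tok] += 1
--     for d in digits:
--         c = count_digits[d]
--         if c == 1:
--             open_rings[d] = 1
--         elif c == 2:
--             open_rings[d] = 2
--     return open_rings
-- ===== SOURCE B (Python) =====
-- def update_ring_status_for_beam(seq_chars, open_rings):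
--     # Sort the ring digits out of the sequence, then scan runs of equal digits:
--     # a run of length 1 or 2 sets that digit's status to the run length.
--     ring = sorted(t for t in seq_chars if t in ('1', '2', '3', '4', '5'))
--     i, n = 0, len(ring)
--     while i < n:
--         j = i + 1
--         while j < n and ring[j] == ring[i]:
--             j += 1
--         if j - i <= 2:
--             open_rings[ring[i]] = j - i
--         i = j
--     return open_rings
-- ===== Notes on version B (the rewrite author's own statement) =====
-- stated objective: alternative
-- what changed: B replaces A's frequency-dict counting pass by sort-then-scan: it extracts the ring digits, sorts them, and walks runs of equal digits with two indices, a run of length 1 or 2 setting that digit's status to the run length.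
import Mathlib
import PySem

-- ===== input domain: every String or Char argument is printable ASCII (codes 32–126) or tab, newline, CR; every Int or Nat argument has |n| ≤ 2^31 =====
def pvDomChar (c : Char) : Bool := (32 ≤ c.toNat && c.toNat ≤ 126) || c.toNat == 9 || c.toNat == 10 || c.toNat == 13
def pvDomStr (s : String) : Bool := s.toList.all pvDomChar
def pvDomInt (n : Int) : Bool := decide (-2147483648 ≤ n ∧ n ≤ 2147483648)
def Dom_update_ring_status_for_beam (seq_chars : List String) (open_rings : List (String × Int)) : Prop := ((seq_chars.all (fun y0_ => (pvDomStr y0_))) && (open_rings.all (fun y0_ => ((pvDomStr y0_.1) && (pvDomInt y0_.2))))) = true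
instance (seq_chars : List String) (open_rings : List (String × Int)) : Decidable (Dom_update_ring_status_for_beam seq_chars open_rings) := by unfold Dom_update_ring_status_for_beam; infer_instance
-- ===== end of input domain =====

-- B replaces A's frequency dict by a sort-then-run-scan: it sorts the ring digits out of the
-- sequence and walks runs of equal digits, a run of length 1 or 2 setting that digit's status
-- (objective: alternative). Both A and B mutate the open_rings dict in place in Python; the
-- equivalence proved here is about the returned dict (which is the same object).

-- ===== PORT A =====
def update_ring_status_for_beam (seq_chars : List String) (open_rings : List (String × Int)) : List (String × Int) :=
  let digits : List String := ["1", "2", "3", "4", "5"]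
  let count_digits : PySem.Dict String Int :=
    digits.foldl (fun cd d => cd.insert d 0) PySem.Dict.empty
  let count_digits :=
    seq_chars.foldl (fun cd tok =>
      if digits.contains tok then cd.modify tok 0 (· + 1) else cd) count_digits
  (digits.foldl (fun orr d =>
      let c := count_digits.getD d 0
      if c == 1 then orr.insert d 1
      else if c == 2 then orr.insert d 2
      else orr) (PySem.Dict.ofList open_rings)).items

-- ===== PORT B =====
-- the inner while loop 'j += 1 while ring[j] == ring[i]' is the run (takeWhile); the outer
-- while loop advances i to j (dropWhile) — one recursive step per run of equal digits
def pvRunScan : List String → PySem.Dict String Int → PySem.Dict String Int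
  | [], orr => orr
  | x :: rest, orr =>
    let k : Int := 1 + ((rest.takeWhile (fun t => t == x)).length : Int)
    pvRunScan (rest.dropWhile (fun t => t == x))
      (if k ≤ 2 then orr.insert x k else orr)
termination_by l _ => l.length
decreasing_by
  simp only [List.length_cons]
  exact Nat.lt_succ_of_le (List.length_dropWhile_le _ _)

def update_ring_status_for_beam_alt (seq_chars : List String) (open_rings : List (String × Int)) : List (String × Int) :=
  let ring := PySem.List.sorted
    (seq_chars.filter (fun t => ["1", "2", "3", "4", "5"].contains t)) (fun x => x) false
  (pvRunScan ring (PySem.Dict.ofList open_rings)).items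

-- ===== PRECONDITION & SPEC =====
def Spec_update_ring_status_for_beam (seq_chars : List String) (open_rings : List (String × Int)) (out : List (String × Int)) : Prop := out = update_ring_status_for_beam_alt seq_chars open_rings
instance (seq_chars : List String) (open_rings : List (String × Int)) (out : List (String × Int)) : Decidable (Spec_update_ring_status_for_beam seq_chars open_rings out) := by unfold Spec_update_ring_status_for_beam; infer_instance

-- ===== CLAIM (what is proved, stated in full; the proofs are below) =====
def Claim_equal_update_ring_status_for_beam : Prop := ∀ (seq_chars : List String) (open_rings : List (String × Int)), Dom_update_ring_status_for_beam seq_chars open_rings → Spec_update_ring_status_for_beam seq_chars open_rings (update_ring_status_for_beam seq_chars open_rings)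

-- ===== LEMMAS AND PROOFS =====

-- The guarded counting fold of A, read at a key that is itself a digit, counts occurrences.
theorem pv_cnt (seq : List String) (cd : PySem.Dict String Int) (v : String)
    (hv : ["1", "2", "3", "4", "5"].contains v = true) :
    (seq.foldl (fun cd tok =>
        if ["1", "2", "3", "4", "5"].contains tok then cd.modify tok 0 (· + 1) else cd) cd).getD v 0
      = cd.getD v 0 + seq.count v := by
  induction seq generalizing cd with
  | nil => simp
  | cons tok rest ih =>
    simp only [List.foldl, List.count_cons]
    by_cases htok : (["1", "2", "3", "4", "5"] : List String).contains tok = true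
    · rw [if_pos htok, ih, PySem.Dict.getD_modify]
      rcases eq_or_ne v tok with hev | hev
      · subst hev
        simp only [beq_self_eq_true, if_true]
        push_cast
        omega
      · rw [if_neg hev]
        have : (tok == v) = false := beq_eq_false_iff_ne.mpr (Ne.symm hev)
        simp [this]
    · rw [if_neg htok, ih]
      have hne : tok ≠ v := by intro h; subst h; exact htok hv
      have : (tok == v) = false := beq_eq_false_iff_ne.mpr hne
      simp [this]

-- A's table lookup for a digit d is the number of occurrences of d in seq_chars.
theorem pv_cntA (seq : List String) (d : String)
    (hd : d = "1" ∨ d = "2" ∨ d = "3" ∨ d = "4" ∨ d = "5") :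
    (seq.foldl (fun cd tok =>
        if ["1", "2", "3", "4", "5"].contains tok then cd.modify tok 0 (· + 1) else cd)
      (((((PySem.Dict.empty.insert "1" (0 : Int)).insert "2" 0).insert "3" 0).insert "4" 0).insert "5" 0)).getD d 0
      = (seq.count d : Int) := by
  have hv : (["1", "2", "3", "4", "5"] : List String).contains d = true := by
    rcases hd with rfl | rfl | rfl | rfl | rfl <;> decide
  rw [pv_cnt seq _ d hv]
  have hz : ((((((PySem.Dict.empty.insert "1" (0 : Int)).insert "2" 0).insert "3" 0).insert "4" 0).insert "5" 0)).getD d 0 = 0 := by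
    rcases hd with rfl | rfl | rfl | rfl | rfl <;> decide
  rw [hz, zero_add]

-- takeWhile/dropWhile of (· == d) on a run of d's followed by non-d elements
theorem pv_take_drop (d : String) (m : Nat) (rest : List String)
    (h : ∀ t ∈ rest, (t == d) = false) :
    (List.replicate m d ++ rest).takeWhile (fun t => t == d) = List.replicate m d ∧
    (List.replicate m d ++ rest).dropWhile (fun t => t == d) = rest := by
  induction m with
  | zero =>
    simp only [List.replicate_zero, List.nil_append]
    cases rest with
    | nil => simp
    | cons r rs =>
      have := h r (List.mem_cons_self ..)
      simp [List.takeWhile, List.dropWhile, this]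
  | succ m ih =>
    simp [List.replicate_succ, ih.1, ih.2]

-- pvRunScan consumes one run (a replicate block) per step
theorem pv_runScan_rep (c : Nat) (d : String) (rest : List String)
    (h : ∀ t ∈ rest, (t == d) = false) (orr : PySem.Dict String Int) :
    pvRunScan (List.replicate c d ++ rest) orr =
      pvRunScan rest
        (if c = 0 then orr else if (c : Int) ≤ 2 then orr.insert d c else orr) := by
  cases c with
  | zero => simp
  | succ m =>
    obtain ⟨ht, hdrp⟩ := pv_take_drop d m rest h
    rw [List.replicate_succ, List.cons_append, pvRunScan, ht, hdrp]
    have hk : (1 : Int) + ((List.replicate m d).length : Int) = ((m + 1 : Nat) : Int) := by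
      simp only [List.length_replicate]; push_cast; ring
    rw [hk]
    norm_num

-- one digit's step: A's two-branch assignment equals B's run-length assignment
theorem pv_step (c : Nat) (orr : PySem.Dict String Int) (d : String) :
    (if (c : Int) == 1 then orr.insert d 1 else if (c : Int) == 2 then orr.insert d 2 else orr)
      = (if c = 0 then orr else if (c : Int) ≤ 2 then orr.insert d (c : Int) else orr) := by
  by_cases h0 : c = 0
  · subst h0; norm_num
  by_cases hc1 : c = 1
  · subst hc1; norm_num
  by_cases hc2 : c = 2
  · subst hc2; norm_num
  have e1 : (((c : Int) == 1) = false) := by simp; omega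
  have e2 : (((c : Int) == 2) = false) := by simp; omega
  have e3 : ¬ ((c : Int) ≤ 2) := by omega
  simp [e1, e2, e3, h0]

-- sorted(filtered ring digits) is the five count-replicates in digit order
theorem pv_sorted_shape (seq : List String) :
    PySem.List.sorted (seq.filter (fun t => ["1", "2", "3", "4", "5"].contains t)) (fun x => x) false
      = List.replicate (seq.count "1") "1" ++ (List.replicate (seq.count "2") "2" ++
        (List.replicate (seq.count "3") "3" ++ (List.replicate (seq.count "4") "4" ++
          List.replicate (seq.count "5") "5"))) := by
  set xs := seq.filter (fun t => ["1", "2", "3", "4", "5"].contains t) with hxs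
  apply PySem.List.sorted_id_eq_of_perm_of_pairwise
  · -- permutation, via counts
    rw [List.perm_iff_count]
    intro a
    have hfc : xs.count a = if (["1", "2", "3", "4", "5"] : List String).contains a then seq.count a else 0 := by
      rw [hxs, List.count_eq_countP, List.countP_filter]
      split
      · next hcon =>
        rw [List.count_eq_countP]
        congr 1
        funext t
        by_cases ht : t = a
        · subst ht; rw [hcon, Bool.and_true]
        · have : (t == a) = false := beq_eq_false_iff_ne.mpr ht
          rw [this, Bool.false_and]
      · next hcon =>
        apply List.countP_eq_zero.mpr
        intro t _ htc
        simp only [Bool.and_eq_true, beq_iff_eq] at htc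
        exact hcon (htc.1 ▸ htc.2)
    rw [hfc]
    by_cases h1 : a = "1"
    · subst h1; simp [List.count_append, List.count_replicate]
    by_cases h2 : a = "2"
    · subst h2; simp [List.count_append, List.count_replicate]
    by_cases h3 : a = "3"
    · subst h3; simp [List.count_append, List.count_replicate]
    by_cases h4 : a = "4"
    · subst h4; simp [List.count_append, List.count_replicate]
    by_cases h5 : a = "5"
    · subst h5; simp [List.count_append, List.count_replicate]
    · simp [List.count_append, List.count_replicate, h1, h2, h3, h4, h5,
        fun s => (Ne.symm · : a ≠ s → s ≠ a)]
  · -- the replicate blocks are weakly increasing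
    refine List.pairwise_append.mpr ⟨?_, ?_, ?_⟩
    · exact List.pairwise_replicate.mpr (Or.inr (le_refl _))
    · refine List.pairwise_append.mpr ⟨?_, ?_, ?_⟩
      · exact List.pairwise_replicate.mpr (Or.inr (le_refl _))
      · refine List.pairwise_append.mpr ⟨?_, ?_, ?_⟩
        · exact List.pairwise_replicate.mpr (Or.inr (le_refl _))
        · refine List.pairwise_append.mpr ⟨?_, ?_, ?_⟩
          · exact List.pairwise_replicate.mpr (Or.inr (le_refl _))
          · exact List.pairwise_replicate.mpr (Or.inr (le_refl _))
          · intro a ha b hb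
            rw [List.eq_of_mem_replicate ha, List.eq_of_mem_replicate hb]
            exact String.le_iff_toList_le.mpr (by decide)
        · intro a ha b hb
          rw [List.eq_of_mem_replicate ha]
          rcases List.mem_append.mp hb with hb | hb <;>
            rw [List.eq_of_mem_replicate hb] <;>
            exact String.le_iff_toList_le.mpr (by decide)
      · intro a ha b hb
        rw [List.eq_of_mem_replicate ha]
        rcases List.mem_append.mp hb with hb | hb
        · rw [List.eq_of_mem_replicate hb]
          exact String.le_iff_toList_le.mpr (by decide)
        rcases List.mem_append.mp hb with hb | hb <;>
          rw [List.eq_of_mem_replicate hb] <;>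
          exact String.le_iff_toList_le.mpr (by decide)
    · intro a ha b hb
      rw [List.eq_of_mem_replicate ha]
      rcases List.mem_append.mp hb with hb | hb
      · rw [List.eq_of_mem_replicate hb]
        exact String.le_iff_toList_le.mpr (by decide)
      rcases List.mem_append.mp hb with hb | hb
      · rw [List.eq_of_mem_replicate hb]
        exact String.le_iff_toList_le.mpr (by decide)
      rcases List.mem_append.mp hb with hb | hb <;>
        rw [List.eq_of_mem_replicate hb] <;>
        exact String.le_iff_toList_le.mpr (by decide)

-- ===== VERDICT (by name: the statement is the Claim_ definition above) =====
theorem update_ring_status_for_beam_spec : Claim_equal_update_ring_status_for_beam := by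
  intro seq orr _
  unfold Spec_update_ring_status_for_beam update_ring_status_for_beam update_ring_status_for_beam_alt
  simp only [List.foldl]
  rw [pv_sorted_shape]
  have h2 : ∀ t ∈ (List.replicate (seq.count "2") "2" ++ (List.replicate (seq.count "3") "3" ++
      (List.replicate (seq.count "4") "4" ++ List.replicate (seq.count "5") "5"))),
      (t == "1") = false := by
    intro t ht
    rcases List.mem_append.mp ht with ht | ht
    · rw [List.eq_of_mem_replicate ht]; decide
    rcases List.mem_append.mp ht with ht | ht
    · rw [List.eq_of_mem_replicate ht]; decide
    rcases List.mem_append.mp ht with ht | ht <;>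
      (rw [List.eq_of_mem_replicate ht]; decide)
  have h3 : ∀ t ∈ (List.replicate (seq.count "3") "3" ++
      (List.replicate (seq.count "4") "4" ++ List.replicate (seq.count "5") "5")),
      (t == "2") = false := by
    intro t ht
    rcases List.mem_append.mp ht with ht | ht
    · rw [List.eq_of_mem_replicate ht]; decide
    rcases List.mem_append.mp ht with ht | ht <;>
      (rw [List.eq_of_mem_replicate ht]; decide)
  have h4 : ∀ t ∈ (List.replicate (seq.count "4") "4" ++ List.replicate (seq.count "5") "5"),
      (t == "3") = false := by
    intro t ht
    rcases List.mem_append.mp ht with ht | ht <;>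
      (rw [List.eq_of_mem_replicate ht]; decide)
  have h5 : ∀ t ∈ (List.replicate (seq.count "5") "5"), (t == "4") = false := by
    intro t ht; rw [List.eq_of_mem_replicate ht]; decide
  have h6 : ∀ t ∈ ([] : List String), (t == "5") = false := by intro t ht; simp at ht
  rw [pv_runScan_rep _ "1" _ h2, pv_runScan_rep _ "2" _ h3, pv_runScan_rep _ "3" _ h4,
      pv_runScan_rep _ "4" _ h5]
  rw [show List.replicate (seq.count "5") "5" = List.replicate (seq.count "5") "5" ++ [] by simp]
  rw [pv_runScan_rep _ "5" _ h6]
  simp only [pvRunScan]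
  simp only [pv_cntA seq "1" (by tauto), pv_cntA seq "2" (by tauto), pv_cntA seq "3" (by tauto),
      pv_cntA seq "4" (by tauto), pv_cntA seq "5" (by tauto)]
  simp only [pv_step]
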